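-- pv_equiv track=rewrite | github.com/Shashank2125/CodePush | 4-kyu/next-smaller-number-with-the-same-digits/next-smaller-number-with-the-same-digits.py | next_smaller
-- ===== SOURCE A (Python) =====
-- def next_smaller(n):
--     digits=list(str(n))
--     #find the pivot
--     i=len(digits)-2
--     while i>=0 and digits[i]<=digits[i+1]:
--         i-=1
--     if i<0:
--         return -1
--     #find right most smallest digit
--     j=len(digits)-1
--     while digits[j]>=digits[i]:
--         j-=1
--     #swap digits
--     digits[i],digits[j]=digits[j],digits[i]
--     digits[i+1:]=reversed(digits[i+1:])
--     #leading zero check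
--     if digits[0]=="0":
--         return -1
--     return int("".join(digits))
-- ===== SOURCE B (Python) =====
-- def next_smaller(n):
--     digits = list(str(n))
--     # forward scan: i = last index with digits[i] > digits[i+1] (-1 if none)
--     i = -1
--     for k in range(len(digits) - 1):
--         if digits[k + 1] < digits[k]:
--             i = k
--     if i == -1:
--         return -1
--     p = digits[i]
--     suffix = digits[i + 1:]
--     # largest digit in the suffix that is strictly smaller than the pivot
--     cand = max([c for c in suffix if c < p])
--     suffix.remove(cand)
--     tail = sorted(suffix + [p], reverse=True)
--     out = digits[:i] + [cand] + tail
--     if out[0] == "0":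
--         return -1
--     return int("".join(out))
-- ===== Notes on version B (the rewrite author's own statement) =====
-- stated objective: alternative
-- what changed: The backward while-loop pivot scan becomes a forward scan keeping the last descent index, and the rightmost-smaller j-scan + swap + suffix reversal is replaced by selecting the maximal suffix digit below the pivot, removing one occurrence and sorting the remaining suffix plus the pivot in descending order.
import Mathlib
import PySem

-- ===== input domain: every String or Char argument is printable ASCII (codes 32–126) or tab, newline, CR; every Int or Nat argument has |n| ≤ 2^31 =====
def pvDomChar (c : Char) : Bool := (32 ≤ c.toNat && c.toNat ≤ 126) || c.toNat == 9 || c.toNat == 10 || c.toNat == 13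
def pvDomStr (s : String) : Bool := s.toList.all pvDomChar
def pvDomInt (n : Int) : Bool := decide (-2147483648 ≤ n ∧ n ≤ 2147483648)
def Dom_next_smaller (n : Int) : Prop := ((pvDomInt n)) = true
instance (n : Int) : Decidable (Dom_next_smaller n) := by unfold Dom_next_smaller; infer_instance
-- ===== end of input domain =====

-- B replaces A's backward pivot while-loop by a forward last-descent scan and the
-- rightmost-smaller search + swap + suffix reversal by max-below-pivot selection,
-- removal and a descending sort of the suffix (alternative decomposition, same cost class).


-- ===== PORT A =====
-- 'while i>=0 and digits[i]<=digits[i+1]: i-=1' scanning down from i; none = the loop ran past 0 (i = -1)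
def pivA (ds : List Char) : Nat → Option Nat
  | 0 => if ds.getD 0 ' ' ≤ ds.getD 1 ' ' then none else some 0
  | (i+1) => if ds.getD (i+1) ' ' ≤ ds.getD (i+2) ' ' then pivA ds i else some (i+1)

-- 'while digits[j]>=digits[i]: j-=1' scanning down from j (on A's reachable states it stops at j ≥ i+1 > 0)
def jA (ds : List Char) (p : Char) : Nat → Nat
  | 0 => 0
  | (j+1) => if p ≤ ds.getD (j+1) ' ' then jA ds p j else (j+1)

def next_smaller (n : Int) : Int :=
  let ds := (PySem.Int.toStr n).toList          -- digits = list(str(n))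
  if ds.length < 2 then -1                      -- i = len-2 < 0: while loop skipped, 'if i<0: return -1'
  else
    match pivA ds (ds.length - 2) with          -- the backward pivot while-loop
    | none => -1                                -- 'if i<0: return -1'
    | some i =>
      let di := ds.getD i ' '
      let j := jA ds di (ds.length - 1)
      let dj := ds.getD j ' '
      let sw := (ds.set i dj).set j di          -- digits[i],digits[j]=digits[j],digits[i]
      let res := sw.take (i+1) ++ (sw.drop (i+1)).reverse   -- digits[i+1:]=reversed(digits[i+1:])
      if res.getD 0 ' ' = '0' then -1
      else (PySem.Int.ofChars? res).getD 0      -- int("".join(digits)); never ValueError: a digit string, '-' only leading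

-- ===== PORT B =====
def next_smaller_alt (n : Int) : Int :=
  let ds := (PySem.Int.toStr n).toList          -- digits = list(str(n))
  -- for k in range(len(digits)-1): if digits[k+1] < digits[k]: i = k      (i starts at -1)
  let i0 : Int := (PySem.List.pyRange 0 ((ds.length : Int) - 1) 1).foldl
      (fun acc k => if PySem.List.pyGetD ds (k+1) ' ' < PySem.List.pyGetD ds k ' ' then k else acc) (-1)
  if i0 = -1 then -1
  else
    let i := i0.toNat                           -- i ≥ 0 here
    let p := ds.getD i ' '                      -- p = digits[i]
    let suffix := ds.drop (i+1)                 -- digits[i+1:] with nonnegative start = drop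
    -- cand = max([c for c in suffix if c < p]); nonempty (digits[i+1] < p), so max never raises
    let cand := (PySem.List.max? (suffix.filter (fun c => decide (c < p))) (fun c => c)).getD ' '
    let rest := (PySem.List.remove? suffix cand).getD []   -- suffix.remove(cand); cand ∈ suffix, no ValueError
    let tail := PySem.List.sorted (rest ++ [p]) (fun c => c) true  -- sorted(suffix + [p], reverse=True)
    let out := ds.take i ++ [cand] ++ tail      -- digits[:i] + [cand] + tail
    if out.getD 0 ' ' = '0' then -1
    else (PySem.Int.ofChars? out).getD 0        -- int("".join(out)); never ValueError here

-- ===== PRECONDITION & SPEC =====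
def Spec_next_smaller (n : Int) (out : Int) : Prop := out = next_smaller_alt n
instance (n : Int) (out : Int) : Decidable (Spec_next_smaller n out) := by unfold Spec_next_smaller; infer_instance

-- ===== CLAIM (what is proved, stated in full; the proofs are below) =====
def Claim_equal_next_smaller : Prop := ∀ (n : Int), Dom_next_smaller n → Spec_next_smaller n (next_smaller n)

-- ===== LEMMAS AND PROOFS =====

-- B's forward foldl pivot scan computes the same pivot as A's backward while loop
theorem pivB_foldl (ds : List Char) (t : Nat) :
    (PySem.List.pyRange 0 ((t : Int) + 1) 1).foldl
      (fun acc k => if PySem.List.pyGetD ds (k+1) ' ' < PySem.List.pyGetD ds k ' ' then k else acc) (-1)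
    = (pivA ds t).elim (-1 : Int) (fun i => (i : Int)) := by
  induction t with
  | zero =>
    rw [show ((0:Nat):Int) + 1 = (0:Int) + 1 by norm_num, PySem.List.pyRange_one_singleton]
    simp only [List.foldl, pivA]
    rw [show (0:Int) + 1 = ((1:Nat):Int) by norm_num, PySem.List.pyGetD_natCast,
        show (0:Int) = ((0:Nat):Int) by norm_num, PySem.List.pyGetD_natCast]
    by_cases hc : ds.getD 0 ' ' ≤ ds.getD 1 ' '
    · rw [if_neg (not_lt.2 hc), if_pos hc]; rfl
    · rw [if_pos (not_le.1 hc), if_neg hc]; simp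
  | succ t ih =>
    rw [show (((t+1:Nat)):Int) + 1 = (((t:Nat):Int) + 1) + 1 by push_cast; ring,
        PySem.List.pyRange_one_succ_right (by omega), List.foldl_append, ih]
    simp only [List.foldl]
    rw [show ((t:Int) + 1 + 1) = (((t+2:Nat)):Int) by push_cast; ring,
        show ((t:Int) + 1) = (((t+1:Nat)):Int) by push_cast; ring,
        PySem.List.pyGetD_natCast, PySem.List.pyGetD_natCast]
    simp only [pivA]
    by_cases hc : ds.getD (t+1) ' ' ≤ ds.getD (t+2) ' '
    · rw [if_neg (not_lt.2 hc), if_pos hc]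
    · rw [if_pos (not_le.1 hc), if_neg hc]; simp

theorem pivA_spec (ds : List Char) (t : Nat) (i : Nat) (h : pivA ds t = some i) :
    i ≤ t ∧ ds.getD (i+1) ' ' < ds.getD i ' ' ∧
      ∀ k, i < k → k ≤ t → ds.getD k ' ' ≤ ds.getD (k+1) ' ' := by
  induction t with
  | zero =>
    simp only [pivA] at h
    split_ifs at h with h1
    · have hi : i = 0 := by injection h with h'; omega
      subst hi
      exact ⟨le_refl 0, not_le.1 h1, fun k hk hk' => by omega⟩
  | succ t ih =>
    simp only [pivA] at h
    split_ifs at h with h1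
    · obtain ⟨ha, hb, hc⟩ := ih h
      refine ⟨by omega, hb, fun k hk hk' => ?_⟩
      rcases Nat.lt_or_ge k (t+1) with h2 | h2
      · exact hc k hk (by omega)
      · have : k = t + 1 := by omega
        subst this; exact h1
    · have hi : i = t + 1 := by injection h with h'; omega
      subst hi
      exact ⟨le_refl _, not_le.1 h1, fun k hk hk' => by omega⟩

theorem jA_spec (ds : List Char) (p : Char) (w : Nat) :
    ∀ t, ds.getD w ' ' < p → w ≤ t →
      w ≤ jA ds p t ∧ jA ds p t ≤ t ∧ ds.getD (jA ds p t) ' ' < p ∧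
        ∀ k, jA ds p t < k → k ≤ t → p ≤ ds.getD k ' ' := by
  intro t
  induction t with
  | zero =>
    intro hw hwt
    have : w = 0 := by omega
    subst this
    exact ⟨le_refl _, le_refl _, hw, fun k hk hk' => by omega⟩
  | succ t ih =>
    intro hw hwt
    simp only [jA]
    split_ifs with h1
    · have hwne : w ≠ t + 1 := fun he => by subst he; exact absurd h1 (not_le.2 hw)
      obtain ⟨ha, hb, hc, hd⟩ := ih hw (by omega)
      refine ⟨ha, by omega, hc, fun k hk hk' => ?_⟩
      rcases Nat.lt_or_ge k (t+1) with h2 | h2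
      · exact hd k hk (by omega)
      · have : k = t + 1 := by omega
        subst this; exact h1
    · exact ⟨by omega, le_refl _, not_le.1 h1, fun k hk hk' => by omega⟩

theorem getD_mono (ds : List Char) (i t : Nat)
    (hm : ∀ k, i < k → k ≤ t → ds.getD k ' ' ≤ ds.getD (k+1) ' ') :
    ∀ a b, i < a → a ≤ b → b ≤ t + 1 → ds.getD a ' ' ≤ ds.getD b ' ' := by
  intro a b ha hab
  induction b, hab using Nat.le_induction with
  | base => intro _; exact le_refl _
  | succ b hb ih =>
    intro hbt
    exact le_trans (ih (by omega)) (hm b (by omega) (by omega))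

-- Core: with a pivot i, A's swap+reverse suffix equals B's pick-max+remove+descending-sort suffix
theorem lists_eq (ds : List Char) (i j : Nat) (p dj cand : Char)
    (h2 : 2 ≤ ds.length) (hpiv : pivA ds (ds.length - 2) = some i)
    (hp : p = ds.getD i ' ') (hj : j = jA ds p (ds.length - 1)) (hdj : dj = ds.getD j ' ')
    (hcand : cand = (PySem.List.max? ((ds.drop (i+1)).filter (fun c => decide (c < p))) (fun c => c)).getD ' ') :
    ((ds.set i dj).set j p).take (i+1) ++ (((ds.set i dj).set j p).drop (i+1)).reverse
    = ds.take i ++ [cand] ++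
        PySem.List.sorted (((PySem.List.remove? (ds.drop (i+1)) cand).getD []) ++ [p]) (fun c => c) true := by
  obtain ⟨hit, hdesc, hmono⟩ := pivA_spec ds (ds.length - 2) i hpiv
  have hwlt : ds.getD (i+1) ' ' < p := by rw [hp]; exact hdesc
  obtain ⟨hwj, hjt, hjlt, hjge⟩ := jA_spec ds p (i+1) (ds.length - 1) hwlt (by omega)
  rw [← hj] at hwj hjt hjlt hjge
  have hm : ∀ a b, i < a → a ≤ b → b ≤ ds.length - 1 → ds.getD a ' ' ≤ ds.getD b ' ' := by
    have := getD_mono ds i (ds.length - 2) hmono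
    intro a b ha hab hb; exact this a b ha hab (by omega)
  have hilen : i < ds.length := by omega
  have hjlen : j < ds.length := by omega
  have hij : i < j := by omega
  have hSlen : (ds.drop (i+1)).length = ds.length - (i+1) := by simp
  have hSget : ∀ m, (ds.drop (i+1)).getD m ' ' = ds.getD (i+1+m) ' ' := by
    intro m
    rw [List.getD_eq_getElem?_getD, List.getD_eq_getElem?_getD, List.getElem?_drop]
  have hSgetE : ∀ m (h : m < (ds.drop (i+1)).length),
      (ds.drop (i+1))[m]'h = ds.getD (i+1+m) ' ' := by
    intro m h
    rw [← List.getD_eq_getElem (ds.drop (i+1)) ' ' h, hSget m]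
  have hj'S : j - (i+1) < (ds.drop (i+1)).length := by omega
  have hSj' : (ds.drop (i+1))[j - (i+1)]'hj'S = dj := by
    rw [hSgetE _ hj'S, show i+1+(j-(i+1)) = j by omega, hdj]
  have hdjS : dj ∈ ds.drop (i+1) := by rw [← hSj']; exact List.getElem_mem hj'S
  have hdjF : dj ∈ (ds.drop (i+1)).filter (fun c => decide (c < p)) :=
    List.mem_filter.2 ⟨hdjS, by simpa using (hdj ▸ hjlt : dj < p)⟩
  have hub : ∀ x ∈ (ds.drop (i+1)).filter (fun c => decide (c < p)), x ≤ dj := by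
    intro x hx
    obtain ⟨hxS, hxp'⟩ := List.mem_filter.1 hx
    have hxp : x < p := by simpa using hxp'
    obtain ⟨m, hmlt, hxm⟩ := List.mem_iff_getElem.1 hxS
    rw [← hxm, hSgetE m hmlt]
    rw [hSlen] at hmlt
    by_cases hcase : i+1+m ≤ j
    · calc ds.getD (i+1+m) ' ' ≤ ds.getD j ' ' := hm (i+1+m) j (by omega) hcase (by omega)
        _ = dj := hdj.symm
    · exfalso
      have hple : p ≤ ds.getD (i+1+m) ' ' := hjge (i+1+m) (by omega) (by omega)
      rw [← hSgetE m (by omega), hxm] at hple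
      exact absurd hxp (not_lt.2 hple)
  obtain ⟨mx, hmx⟩ : ∃ mx, PySem.List.max? ((ds.drop (i+1)).filter (fun c => decide (c < p))) (fun c => c) = some mx := by
    cases hq : PySem.List.max? ((ds.drop (i+1)).filter (fun c => decide (c < p))) (fun c => c) with
    | none =>
      rw [PySem.List.max?_eq_none_iff] at hq
      rw [hq] at hdjF; simp at hdjF
    | some v => exact ⟨v, rfl⟩
  have hcdj : cand = dj := by
    rw [hcand, hmx, Option.getD_some]
    exact le_antisymm (hub mx (PySem.List.max?_mem hmx)) (PySem.List.max?_isMax hmx dj hdjF)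
  have hrem : PySem.List.remove? (ds.drop (i+1)) dj = some ((ds.drop (i+1)).erase dj) :=
    PySem.List.remove?_eq_some_erase (ds.drop (i+1)) dj hdjS
  -- decompose the swapped list
  have hlt : (ds.take i).length = i := by simp; omega
  have hswe : (ds.set i dj).set j p = ds.take i ++ dj :: (ds.drop (i+1)).set (j-(i+1)) p := by
    have h1 : ds.set i dj = ds.take i ++ dj :: ds.drop (i+1) := by
      rw [List.set_eq_take_append_cons_drop, if_pos hilen]
    rw [h1, List.set_append]
    rw [if_neg (by omega)]
    congr 1
    rw [hlt, show j - i = (j - (i+1)) + 1 by omega]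
    rfl
  have hta : ((ds.set i dj).set j p).take (i+1) = ds.take i ++ [dj] := by
    rw [hswe, show i + 1 = (ds.take i).length + 1 by rw [hlt]]
    simp [List.take_append]
  have hdr : ((ds.set i dj).set j p).drop (i+1) = (ds.drop (i+1)).set (j-(i+1)) p := by
    rw [hswe, show i + 1 = (ds.take i).length + 1 by rw [hlt]]
    simp [List.drop_append]
  rw [hta, hdr, hcdj, hrem, Option.getD_some]
  -- the two suffixes agree: both list the same multiset in non-increasing order
  have e2 : (ds.drop (i+1)).take (j-(i+1)) ++ dj :: (ds.drop (i+1)).drop ((j-(i+1))+1) = ds.drop (i+1) := by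
    rw [← hSj', List.getElem_cons_drop, List.take_append_drop]
  have e1 : (ds.drop (i+1)).set (j-(i+1)) p
      = (ds.drop (i+1)).take (j-(i+1)) ++ p :: (ds.drop (i+1)).drop ((j-(i+1))+1) := by
    rw [List.set_eq_take_append_cons_drop, if_pos hj'S]
  have t1 : List.Perm ((ds.drop (i+1)).set (j-(i+1)) p)
      (p :: ((ds.drop (i+1)).take (j-(i+1)) ++ (ds.drop (i+1)).drop ((j-(i+1))+1))) := by
    rw [e1]; exact List.perm_middle
  have t2 : List.Perm ((ds.drop (i+1)).take (j-(i+1)) ++ (ds.drop (i+1)).drop ((j-(i+1))+1))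
      ((ds.drop (i+1)).erase dj) := by
    have hA : List.Perm (ds.drop (i+1))
        (dj :: ((ds.drop (i+1)).take (j-(i+1)) ++ (ds.drop (i+1)).drop ((j-(i+1))+1))) := by
      conv_lhs => rw [← e2]
      exact List.perm_middle
    have hB : List.Perm (ds.drop (i+1)) (dj :: (ds.drop (i+1)).erase dj) := List.perm_cons_erase hdjS
    exact (hA.symm.trans hB).cons_inv
  have t3 : List.Perm (p :: (ds.drop (i+1)).erase dj) ((ds.drop (i+1)).erase dj ++ [p]) :=
    (List.perm_append_singleton p ((ds.drop (i+1)).erase dj)).symm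
  have hperm : List.Perm (((ds.drop (i+1)).set (j-(i+1)) p).reverse)
      (PySem.List.sorted ((ds.drop (i+1)).erase dj ++ [p]) (fun c => c) true) :=
    (List.reverse_perm _).trans ((t1.trans ((t2.cons p).trans t3)).trans
      (PySem.List.sorted_perm ((ds.drop (i+1)).erase dj ++ [p]) (fun c => c) true).symm)
  have hsorted1 : (((ds.drop (i+1)).set (j-(i+1)) p).reverse).Pairwise (fun a b : Char => b ≤ a) := by
    rw [List.pairwise_reverse]
    rw [List.pairwise_iff_getElem]
    intro a b ha hb hab
    simp only [List.length_set] at ha hb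
    rw [List.getElem_set, List.getElem_set]
    have hbl : i+1+b ≤ ds.length - 1 := by rw [hSlen] at hb; omega
    by_cases hbj : j - (i+1) = b
    · rw [if_pos hbj, if_neg (by omega)]
      rw [hSgetE a ha]
      calc ds.getD (i+1+a) ' ' ≤ ds.getD j ' ' := hm (i+1+a) j (by omega) (by omega) (by omega)
        _ ≤ p := le_of_lt hjlt
    · rw [if_neg hbj]
      by_cases haj : j - (i+1) = a
      · rw [if_pos haj, hSgetE b hb]
        exact hjge (i+1+b) (by omega) hbl
      · rw [if_neg haj, hSgetE a ha, hSgetE b hb]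
        exact hm (i+1+a) (i+1+b) (by omega) (by omega) hbl
  have hsorted2 : (PySem.List.sorted ((ds.drop (i+1)).erase dj ++ [p]) (fun c => c) true).Pairwise
      (fun a b : Char => b ≤ a) := by
    simpa using PySem.List.sorted_pairwise_rev ((ds.drop (i+1)).erase dj ++ [p]) (fun c : Char => c)
  rw [List.append_assoc, List.append_assoc]
  congr 2
  exact hperm.eq_of_pairwise (fun a b _ _ x y => le_antisymm y x) hsorted1 hsorted2

theorem ns_eq (n : Int) : next_smaller n = next_smaller_alt n := by
  simp only [next_smaller, next_smaller_alt]
  generalize (PySem.Int.toStr n).toList = ds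
  by_cases hlen : ds.length < 2
  · rw [if_pos hlen]
    have hr : PySem.List.pyRange 0 ((ds.length : Int) - 1) 1 = [] :=
      PySem.List.pyRange_one_eq_nil (by omega)
    rw [hr]
    simp
  · rw [if_neg hlen]
    have h2 : 2 ≤ ds.length := by omega
    rw [show ((ds.length : Int) - 1) = ((ds.length - 2 : Nat) : Int) + 1 by omega]
    rw [pivB_foldl ds (ds.length - 2)]
    cases hpiv : pivA ds (ds.length - 2) with
    | none => simp
    | some i =>
      simp only [Option.elim]
      rw [if_neg (by omega : ¬((i : Int) = -1))]
      simp only [Int.toNat_natCast]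
      rw [lists_eq ds i _ _ _ _ h2 hpiv rfl rfl rfl rfl]
      rfl


-- ===== VERDICT (by name: the statement is the Claim_ definition above) =====
theorem next_smaller_spec : Claim_equal_next_smaller := by
  intro n _
  exact ns_eq n
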